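-- pv_equiv track=rewrite | github.com/daniel-reich/turbo-robot | 6pEGXsuCAxbWTRkgc_17.py | loves_me
-- ===== SOURCE A (Python) =====
-- def loves_me(n):
--     a=''
--     a1='Loves me, '
--     a2='Loves me not, '
--     for x in range(n):
--         if x%2==0:
--             if x+1==n:
--                 a+=a1[:-2].upper()
--             else:
--                 a+=a1
--         else:
--             if x+1==n:
--                 a+=a2[:-2].upper()
--             else:
--                 a+=a2
--     return a
-- ===== SOURCE B (Python) =====
-- def loves_me(n):
--     phrases = ['Loves me' if x % 2 == 0 else 'Loves me not' for x in range(n)]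
--     if phrases:
--         phrases[-1] = phrases[-1].upper()
--     return ', '.join(phrases)
-- ===== Notes on version B (the rewrite author's own statement) =====
-- stated objective: simpler
-- what changed: B collects bare phrases per index, uppercases only the last element afterwards, and joins with ', ' — moving A's per-iteration terminal check and separator handling out of the loop into a post-processing join pass.
import Mathlib
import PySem

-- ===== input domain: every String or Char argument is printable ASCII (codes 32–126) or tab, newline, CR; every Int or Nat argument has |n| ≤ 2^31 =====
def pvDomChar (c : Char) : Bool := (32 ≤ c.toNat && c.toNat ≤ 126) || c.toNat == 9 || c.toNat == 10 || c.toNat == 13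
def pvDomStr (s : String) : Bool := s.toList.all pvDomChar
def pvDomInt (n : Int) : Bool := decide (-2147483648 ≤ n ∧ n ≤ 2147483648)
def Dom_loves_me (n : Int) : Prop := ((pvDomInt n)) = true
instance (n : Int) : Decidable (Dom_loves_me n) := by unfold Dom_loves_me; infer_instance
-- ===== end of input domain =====

-- ===== PORT A =====
-- B collects bare phrases, uppercases only the last afterwards, and joins with ", ",
-- moving A's per-iteration terminal check and separator handling out of the loop. (simpler)
def loves_me (n : Int) : String :=
  let a1 : List Char := "Loves me, ".toList
  let a2 : List Char := "Loves me not, ".toList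
  let a : List Char := (PySem.List.pyRange 0 n 1).foldl (fun a x =>
    if PySem.Int.mod x 2 = 0 then
      if x + 1 = n then a ++ PySem.Chars.upper (PySem.List.slice a1 none (some (-2)))
      else a ++ a1
    else
      if x + 1 = n then a ++ PySem.Chars.upper (PySem.List.slice a2 none (some (-2)))
      else a ++ a2) []
  String.ofList a

-- ===== PORT B =====
def lovePhrase (x : Int) : List Char :=
  if PySem.Int.mod x 2 = 0 then "Loves me".toList else "Loves me not".toList

def loves_me_alt (n : Int) : String :=
  let phrases : List (List Char) := (PySem.List.pyRange 0 n 1).map lovePhrase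
  let phrases : List (List Char) :=
    if phrases.isEmpty then phrases
    else phrases.dropLast ++ [PySem.Chars.upper phrases.getLast!]
  String.ofList (PySem.Chars.join ", ".toList phrases)

-- ===== PRECONDITION & SPEC =====
def Spec_loves_me (n : Int) (out : String) : Prop := out = loves_me_alt n
instance (n : Int) (out : String) : Decidable (Spec_loves_me n out) := by unfold Spec_loves_me; infer_instance

-- ===== CLAIM (what is proved, stated in full; the proofs are below) =====
def Claim_equal_loves_me : Prop := ∀ (n : Int), Dom_loves_me n → Spec_loves_me n (loves_me n)

-- ===== LEMMAS AND PROOFS =====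

-- intercalate's cons-cons step (Mathlib has no named equation for it in this version)
theorem intercalate_cons_cons' (sep p r : List Char) (rs : List (List Char)) :
    sep.intercalate (p :: r :: rs) = p ++ sep ++ sep.intercalate (r :: rs) := by
  simp [List.intercalate, List.intersperse]

-- join of a list with a distinguished last element = trailing-separator concat of the front, then the last
theorem join_append_singleton (sep q : List Char) :
    ∀ ps : List (List Char),
      PySem.Chars.join sep (ps ++ [q]) = ps.flatMap (fun p => p ++ sep) ++ q := by
  intro ps
  induction ps with
  | nil => simp [PySem.Chars.join, List.intercalate]
  | cons p ps ih =>
    cases ps with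
    | nil => simp [PySem.Chars.join, List.intercalate, List.intersperse]
    | cons p' ps' =>
      simp only [PySem.Chars.join, List.cons_append] at ih ⊢
      rw [intercalate_cons_cons', ih]
      simp

theorem loves_me_spec_of_pos (n : Int) (hn : 0 < n) :
    loves_me n = loves_me_alt n := by
  have hsplit : PySem.List.pyRange 0 n 1 = PySem.List.pyRange 0 (n - 1) 1 ++ [n - 1] := by
    have := PySem.List.pyRange_one_succ_right (a := 0) (b := n - 1) (by omega)
    simpa [sub_add_cancel] using this
  -- A side
  have hA : loves_me n = String.ofList
      ((PySem.List.pyRange 0 (n - 1) 1).flatMap (fun x => lovePhrase x ++ ", ".toList)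
        ++ PySem.Chars.upper (lovePhrase (n - 1))) := by
    simp only [loves_me, hsplit, List.foldl_append, List.foldl_cons, List.foldl_nil]
    rw [PySem.List.foldl_congr_mem _ _
      (fun a x => a ++ (lovePhrase x ++ ", ".toList)) []
      (by
        intro acc x hx
        have hxlt : x < n - 1 := (PySem.List.mem_pyRange_one.mp hx).2
        have h1 : ¬ (x + 1 = n) := by omega
        simp only [h1, if_false, lovePhrase]
        split <;> simp)]
    rw [PySem.List.foldl_append_eq_flatMap]
    have h2 : (n - 1) + 1 = n := by omega
    simp only [h2, lovePhrase]
    congr 1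
    split <;> rfl
  -- B side
  have hB : loves_me_alt n = String.ofList
      (PySem.Chars.join ", ".toList
        ((PySem.List.pyRange 0 (n - 1) 1).map lovePhrase
          ++ [PySem.Chars.upper (lovePhrase (n - 1))])) := by
    simp only [loves_me_alt, hsplit, List.map_append, List.map_cons, List.map_nil]
    simp
  rw [hA, hB, join_append_singleton]
  congr 1
  simp [List.flatMap_map]

-- ===== VERDICT (by name: the statement is the Claim_ definition above) =====
theorem loves_me_spec : Claim_equal_loves_me := by
  intro n _
  unfold Spec_loves_me
  by_cases hn : 0 < n
  · exact loves_me_spec_of_pos n hn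
  · have h : PySem.List.pyRange 0 n 1 = [] := PySem.List.pyRange_one_eq_nil (by omega)
    simp [loves_me, loves_me_alt, h, PySem.Chars.join, List.intercalate]
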